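-- pv_equiv track=rewrite | github.com/Wanderer-Keerthi/algo-expert | longest_streak_of_adjacent_ones.py | longestStreakOfAdjacentOnes
-- ===== SOURCE A (Python) =====
-- def longestStreakOfAdjacentOnes(array):
--     # Write your code here.
--     longestStreakLength = 0
--     longestStreakReplacedZeroIdx = -1
--
--     currentStreakLength = 0
--     replacedZeroIdx = -1
--
--     for i in range(len(array)):
--         if array[i] == 1:
--             currentStreakLength += 1
--         else:
--             currentStreakLength = i - replacedZeroIdx
--             replacedZeroIdx = i
--
--         if currentStreakLength > longestStreakLength:
--             longestStreakLength = currentStreakLength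
--             longestStreakReplacedZeroIdx = replacedZeroIdx
--
--     return longestStreakReplacedZeroIdx
-- ===== SOURCE B (Python) =====
-- def longestStreakOfAdjacentOnes(array):
--     # Collect the indices of all non-one elements, then score each such
--     # index by the gap between its neighbouring non-ones (sentinels -1 / len).
--     zeros = [i for i, v in enumerate(array) if v != 1]
--     n = len(array)
--     best_len, best_idx = 0, -1
--     prev = -1
--     for k, z in enumerate(zeros):
--         nxt = zeros[k + 1] if k + 1 < len(zeros) else n
--         length = nxt - prev - 1
--         if length > best_len:
--             best_len, best_idx = length, z
--         prev = z
--     return best_idx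
-- ===== Notes on version B (the rewrite author's own statement) =====
-- stated objective: alternative
-- what changed: A tracks a running streak and best-so-far in one pass over the elements; B first collects the list of non-one indices and then scores each such index by the gap between its two neighbouring non-ones (sentinels -1 and len), keeping the first maximum.
import Mathlib
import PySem

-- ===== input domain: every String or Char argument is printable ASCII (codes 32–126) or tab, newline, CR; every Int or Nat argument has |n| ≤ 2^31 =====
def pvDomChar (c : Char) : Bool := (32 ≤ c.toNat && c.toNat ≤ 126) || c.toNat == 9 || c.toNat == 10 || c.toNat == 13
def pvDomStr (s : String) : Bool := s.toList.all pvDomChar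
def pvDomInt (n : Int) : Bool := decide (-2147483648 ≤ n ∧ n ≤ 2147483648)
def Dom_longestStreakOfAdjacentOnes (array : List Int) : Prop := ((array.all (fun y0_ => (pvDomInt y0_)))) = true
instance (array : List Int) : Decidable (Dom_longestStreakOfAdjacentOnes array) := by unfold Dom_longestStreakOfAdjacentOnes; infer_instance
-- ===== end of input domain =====

-- B replaces A's one-pass streak bookkeeping by collecting the non-one indices and
-- scoring each by the gap between its neighbouring non-ones (objective: alternative, same O(n) cost).

-- ===== PORT A =====
-- walks the list with the running index i and A's four loop variables
def pvALoop (xs : List Int) (i lsl lsi csl rzi : Int) : Int :=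
  match xs with
  | [] => lsi
  | v :: rest =>
    let csl' := if v = 1 then csl + 1 else i - rzi
    let rzi' := if v = 1 then rzi else i
    if csl' > lsl then pvALoop rest (i + 1) csl' rzi' csl' rzi'
    else pvALoop rest (i + 1) lsl lsi csl' rzi'

def longestStreakOfAdjacentOnes (array : List Int) : Int :=
  pvALoop array 0 0 (-1) 0 (-1)

-- ===== PORT B =====
-- the `for k, z in enumerate(zeros)` loop: z is the head, `zeros[k+1]` the lookahead
def pvBScan (zeros : List Int) (prev n bestLen bestIdx : Int) : Int :=
  match zeros with
  | [] => bestIdx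
  | z :: rest =>
    let nxt := match rest with | [] => n | z2 :: _ => z2
    let len := nxt - prev - 1
    if len > bestLen then pvBScan rest z n len z
    else pvBScan rest z n bestLen bestIdx

def longestStreakOfAdjacentOnes_alt (array : List Int) : Int :=
  let zeros := (PySem.List.enumerate array 0).filterMap (fun p => if p.2 ≠ 1 then some p.1 else none)
  pvBScan zeros (-1) (array.length : Int) 0 (-1)

-- ===== PRECONDITION & SPEC =====
def Spec_longestStreakOfAdjacentOnes (array : List Int) (out : Int) : Prop := out = longestStreakOfAdjacentOnes_alt array
instance (array : List Int) (out : Int) : Decidable (Spec_longestStreakOfAdjacentOnes array out) := by unfold Spec_longestStreakOfAdjacentOnes; infer_instance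

-- ===== CLAIM (what is proved, stated in full; the proofs are below) =====
def Claim_equal_longestStreakOfAdjacentOnes : Prop := ∀ (array : List Int), Dom_longestStreakOfAdjacentOnes array → Spec_longestStreakOfAdjacentOnes array (longestStreakOfAdjacentOnes array)

-- ===== LEMMAS AND PROOFS =====

-- the list of indices (counted from i) of the non-one elements of xs
def pvZerosFrom (xs : List Int) (i : Int) : List Int :=
  match xs with
  | [] => []
  | v :: rest => if v ≠ 1 then i :: pvZerosFrom rest (i + 1) else pvZerosFrom rest (i + 1)

theorem pvZeros_eq (xs : List Int) (s : Int) :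
    (PySem.List.enumerate xs s).filterMap (fun p => if p.2 ≠ 1 then some p.1 else none)
      = pvZerosFrom xs s := by
  induction xs generalizing s with
  | nil => simp [PySem.List.enumerate_nil, pvZerosFrom]
  | cons v rest ih =>
    simp only [PySem.List.enumerate_cons, List.filterMap_cons, pvZerosFrom]
    by_cases h : v = 1
    · simp only [h, ne_eq, not_true_eq_false, if_false]
      exact ih (s + 1)
    · simp only [h, ne_eq, not_false_eq_true, if_true]
      rw [ih (s + 1)]

theorem pvZerosFrom_bound (xs : List Int) (i : Int) :
    ∀ z ∈ pvZerosFrom xs i, i ≤ z ∧ z < i + xs.length := by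
  induction xs generalizing i with
  | nil => simp [pvZerosFrom]
  | cons v rest ih =>
    intro z hz
    simp only [pvZerosFrom] at hz
    by_cases h : v = 1
    · simp [h] at hz
      have := ih (i + 1) z hz
      constructor <;> [omega; (simp only [List.length_cons]; push_cast; omega)]
    · simp [h] at hz
      rcases hz with rfl | hz
      · simp only [List.length_cons]; push_cast; omega
      · have := ih (i + 1) z hz
        constructor <;> [omega; (simp only [List.length_cons]; push_cast; omega)]

theorem pvZerosFrom_cons (xs : List Int) (i z0 : Int) (tl : List Int)
    (h : pvZerosFrom xs i = z0 :: tl) :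
    ∃ ys : List Int, tl = pvZerosFrom ys (z0 + 1) ∧ i ≤ z0 ∧
      i + (xs.length : Int) = (z0 + 1) + (ys.length : Int) := by
  induction xs generalizing i with
  | nil => simp [pvZerosFrom] at h
  | cons v rest ih =>
    simp only [pvZerosFrom] at h
    by_cases hv : v = 1
    · simp only [hv, ne_eq, not_true_eq_false, if_false] at h
      rcases ih (i + 1) h with ⟨ys, h1, h2, h3⟩
      exact ⟨ys, h1, by omega, by simp only [List.length_cons]; push_cast at h3 ⊢; omega⟩
    · simp only [hv, ne_eq, not_false_eq_true, if_true] at h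
      injection h with h1 h2
      subst h1
      exact ⟨rest, h2.symm, le_refl _, by simp only [List.length_cons]; push_cast; omega⟩

-- MAIN: A's loop from index i, with last non-one at rzi and the one before it at prev2
-- (so currentStreakLength = i - 1 - prev2), computes B's scan of the remaining non-ones
-- with the pending candidate rzi prepended and the pre-run best (lsl₀, lsi₀).
theorem pvMain (xs : List Int) :
    ∀ (i prev2 lsl₀ lsi₀ rzi : Int),
      pvALoop xs i (if i - 1 - prev2 > lsl₀ then i - 1 - prev2 else lsl₀)
        (if i - 1 - prev2 > lsl₀ then rzi else lsi₀) (i - 1 - prev2) rzi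
      = pvBScan (rzi :: pvZerosFrom xs i) prev2 (i + (xs.length : Int)) lsl₀ lsi₀ := by
  induction xs with
  | nil =>
    intro i prev2 lsl₀ lsi₀ rzi
    simp only [pvALoop, pvZerosFrom, pvBScan, List.length_nil, Int.natCast_zero, add_zero]
    have he : i - prev2 - 1 = i - 1 - prev2 := by ring
    rw [he]
  | cons v rest ih =>
    intro i prev2 lsl₀ lsi₀ rzi
    by_cases hv : v = 1
    · -- a one: streak grows, pending candidate unchanged
      simp only [pvALoop, hv, if_true, pvZerosFrom, ne_eq, not_true_eq_false, if_false]
      rw [show i + (((1 : Int) :: rest).length : Int) = (i + 1) + (rest.length : Int) from by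
        simp only [List.length_cons]; push_cast; omega]
      have hIH := ih (i + 1) prev2 lsl₀ lsi₀ rzi
      have hc : (i + 1) - 1 - prev2 = i - 1 - prev2 + 1 := by ring
      rw [hc] at hIH
      rw [← hIH]
      split_ifs with h1 h2 h2 h3 h3 <;> first | rfl | (exfalso; omega)
    · -- a non-one at i: close the pending candidate, open a new one at i
      simp only [pvALoop, hv, if_false, pvZerosFrom, ne_eq, not_false_eq_true, if_true]
      -- unfold B's head step (candidate rzi, next non-one at i)
      have hn : i + ((v :: rest).length : Int) = (i + 1) + (rest.length : Int) := by
        simp only [List.length_cons]; push_cast; omega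
      have hb : pvBScan (rzi :: i :: pvZerosFrom rest (i + 1)) prev2 (i + ((v :: rest).length : Int)) lsl₀ lsi₀
          = pvBScan (i :: pvZerosFrom rest (i + 1)) rzi (i + ((v :: rest).length : Int))
              (if i - 1 - prev2 > lsl₀ then i - 1 - prev2 else lsl₀)
              (if i - 1 - prev2 > lsl₀ then rzi else lsi₀) := by
        simp only [pvBScan]
        have he : i - prev2 - 1 = i - 1 - prev2 := by ring
        rw [he]
        split_ifs <;> rfl
      rw [hb, hn]
      have hIH := ih (i + 1) rzi (if i - 1 - prev2 > lsl₀ then i - 1 - prev2 else lsl₀)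
        (if i - 1 - prev2 > lsl₀ then rzi else lsi₀) i
      have hc : (i + 1) - 1 - rzi = i - rzi := by ring
      rw [hc] at hIH
      rw [← hIH]
      by_cases h1 : i - rzi > (if i - 1 - prev2 > lsl₀ then i - 1 - prev2 else lsl₀)
      · rw [if_pos h1, if_pos h1, if_pos h1]
      · rw [if_neg h1, if_neg h1, if_neg h1]

-- the artificial leading candidate (index -1) never changes the result
theorem pvHead (array : List Int) :
    pvBScan ((-1) :: pvZerosFrom array 0) (-1) (array.length : Int) 0 (-1)
      = pvBScan (pvZerosFrom array 0) (-1) (array.length : Int) 0 (-1) := by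
  rcases hz : pvZerosFrom array 0 with _ | ⟨z0, tl⟩
  · simp only [pvBScan]
    split_ifs <;> rfl
  · have hz0 := pvZerosFrom_bound array 0 z0 (by rw [hz]; exact List.mem_cons_self)
    rcases pvZerosFrom_cons array 0 z0 tl hz with ⟨ys, htl, hle, hlen⟩
    rcases tl with _ | ⟨z1, tl'⟩
    · -- single non-one: its length is array.length, which beats the fake candidate
      simp only [pvBScan]
      have h1 : z0 - (-1) - 1 = z0 := by ring
      have h2 : (array.length : Int) - (-1) - 1 = (array.length : Int) := by ring
      rw [h1, h2]
      split_ifs <;> first | rfl | (exfalso; omega)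
    · -- two or more non-ones: the first real step overwrites the fake candidate in both runs
      have hzb : z0 + 1 ≤ z1 := by
        have h1 : z1 ∈ pvZerosFrom ys (z0 + 1) := by
          rw [← htl]; exact List.mem_cons_self
        exact (pvZerosFrom_bound ys (z0 + 1) z1 h1).1
      simp only [pvBScan]
      have h1 : z0 - (-1) - 1 = z0 := by ring
      have h2 : z1 - (-1) - 1 = z1 := by ring
      rw [h1, h2]
      split_ifs <;> first | rfl | (exfalso; omega)

theorem longestStreakOfAdjacentOnes_eq (array : List Int) :
    longestStreakOfAdjacentOnes array = longestStreakOfAdjacentOnes_alt array := by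
  unfold longestStreakOfAdjacentOnes longestStreakOfAdjacentOnes_alt
  rw [pvZeros_eq]
  have h := pvMain array 0 (-1) 0 (-1) (-1)
  have hc : (0 : Int) - 1 - (-1) = 0 := by ring
  rw [hc] at h
  simp only [gt_iff_lt, lt_irrefl, if_false, zero_add] at h
  rw [h]
  exact pvHead array

-- ===== VERDICT (by name: the statement is the Claim_ definition above) =====
theorem longestStreakOfAdjacentOnes_spec : Claim_equal_longestStreakOfAdjacentOnes := by
  intro array _
  exact longestStreakOfAdjacentOnes_eq array
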